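-- pv_equiv track=rewrite | github.com/dhuckle3/adventofcode2022 | src/day01/solution.py | part2
-- ===== SOURCE A (Python) =====
-- def part2(input):
--     return sum(
--         sorted(
--             (
--                 sum(int(v) for v in elf.strip().split("\n"))
--                 for elf in input.split("\n\n")
--             ),
--             reverse=True,
--         )[0:3]
--     )
-- ===== SOURCE B (Python) =====
-- def part2(input):
--     top = []  # ascending list of the (at most 3) largest elf totals so far
--     for elf in input.split("\n\n"):
--         total = 0
--         for v in elf.strip().split("\n"):
--             total += int(v)
--         top = sorted(top + [total])[-3:]
--     return sum(top)
-- ===== Notes on version B (the rewrite author's own statement) =====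
-- stated objective: alternative
-- what changed: B replaces A's full sort of all elf totals followed by a [0:3] slice with a single pass over the totals that maintains only the three largest seen so far (append, sort the at-most-4 list, keep the last 3), summing that tracker at the end; parsing is unchanged.
import Mathlib
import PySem

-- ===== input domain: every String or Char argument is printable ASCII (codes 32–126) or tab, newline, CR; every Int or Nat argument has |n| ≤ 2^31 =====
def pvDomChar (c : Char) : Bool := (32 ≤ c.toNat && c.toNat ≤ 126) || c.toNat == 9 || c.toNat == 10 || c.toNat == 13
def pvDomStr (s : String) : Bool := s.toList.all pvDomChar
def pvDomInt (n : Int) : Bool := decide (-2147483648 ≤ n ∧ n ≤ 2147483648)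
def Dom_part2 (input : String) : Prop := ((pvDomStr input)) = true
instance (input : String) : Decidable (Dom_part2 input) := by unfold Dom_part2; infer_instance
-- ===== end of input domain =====

-- B replaces A's full sort of all elf totals by a single pass that keeps only the three
-- largest totals seen so far (alternative decomposition; same parsing, same result).

-- shared helper: s.split(sep) for a non-empty literal sep (split? is none only for sep = "")
def pvSplit (s sep : String) : List String := (PySem.Str.split? s sep).getD []

-- ===== PORT A =====
-- sum(int(v) for v in elf.strip().split("\n")) ; none = some int(v) raised ValueError
def pvElfTotalA? (elf : String) : Option Int :=
  (pvSplit (PySem.Str.strip elf) "\n").foldl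
    (fun acc v => acc.bind fun s => (PySem.Int.ofStr? v).map (fun n => s + n)) (some 0)

def part2 (input : String) : Int :=
  match (pvSplit input "\n\n").mapM pvElfTotalA? with
  | some totals =>
      (PySem.List.slice (PySem.List.sorted totals (fun x => x) true) (some 0) (some 3)).sum
  | none => 0  -- unreachable under Pre_part2 (ValueError in Python)

-- ===== PORT B =====
-- total = 0; for v in elf.strip().split("\n"): total += int(v)
def pvElfTotalB? (elf : String) : Option Int :=
  (pvSplit (PySem.Str.strip elf) "\n").foldl
    (fun acc v => acc.bind fun s => (PySem.Int.ofStr? v).map (fun n => s + n)) (some 0)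

-- top = sorted(top + [total])[-3:]
def pvStep (top : List Int) (t : Int) : List Int :=
  PySem.List.slice (PySem.List.sorted (top ++ [t]) (fun x => x)) (some (-3)) none

def part2_alt (input : String) : Int :=
  match (pvSplit input "\n\n").foldl
      (fun st elf => st.bind fun top => (pvElfTotalB? elf).map (pvStep top)) (some []) with
  | some top => top.sum
  | none => 0  -- unreachable under Pre_part2 (ValueError in Python)

-- ===== PRECONDITION & SPEC =====
-- Pre_ excludes exactly the inputs where some int(v) raises ValueError (a non-integer line);
-- both A and B raise there.
def Pre_part2 (input : String) : Prop :=
  ((pvSplit input "\n\n").all fun elf =>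
    (pvSplit (PySem.Str.strip elf) "\n").all fun v => (PySem.Int.ofStr? v).isSome) = true
instance (input : String) : Decidable (Pre_part2 input) := by unfold Pre_part2; infer_instance

def pvWitness_part2 : String := "1\n2\n\n30\n\n4\n\n5"

def Spec_part2 (input : String) (out : Int) : Prop := out = part2_alt input
instance (input : String) (out : Int) : Decidable (Spec_part2 input out) := by
  unfold Spec_part2; infer_instance

-- ===== CLAIM (what is proved, stated in full; the proofs are below) =====
def Claim_equal_part2 : Prop :=
  ∀ (input : String), Dom_part2 input → Pre_part2 input → Spec_part2 input (part2 input)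

-- ===== LEMMAS AND PROOFS =====

-- last-3 suffix, as Python's xs[-3:]
def pvK3 (l : List Int) : List Int := l.drop (l.length - 3)

def pvIns (x : Int) (l : List Int) : List Int :=
  PySem.List.insertBy (fun a b => decide (a < b)) x l

lemma pvK3_of_len_le (l : List Int) (h : l.length ≤ 3) : pvK3 l = l := by
  unfold pvK3; rw [show l.length - 3 = 0 by omega]; rfl

lemma pvIns_length (x : Int) (l : List Int) : (pvIns x l).length = l.length + 1 := by
  induction l with
  | nil => rfl
  | cons a l ih =>
      simp only [pvIns, PySem.List.insertBy] at *
      split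
      · simp
      · simp [ih]

lemma pvK3_cons (y : Int) (l : List Int) (h : 3 ≤ l.length) : pvK3 (y :: l) = pvK3 l := by
  unfold pvK3
  have h1 : (y :: l).length - 3 = (l.length - 3) + 1 := by simp; omega
  rw [h1, List.drop_succ_cons]

lemma sorted_single_append (l : List Int) (t : Int) :
    PySem.List.sorted (l ++ [t]) (fun x => x) = pvIns t (PySem.List.sorted l (fun x => x)) := by
  rw [PySem.List.sorted_eq_foldl_insertBy, PySem.List.sorted_eq_foldl_insertBy (key := fun x => x),
    List.foldl_append]
  rfl

lemma pvStep_eq (top : List Int) (t : Int) :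
    pvStep top t = pvK3 (PySem.List.sorted (top ++ [t]) (fun x => x)) := by
  unfold pvStep pvK3
  rw [PySem.List.slice_from_neg_ofNat _ 3 (by omega)]

-- the crux: trimming to the last 3 before inserting does not change the last 3 after inserting
lemma pvK3_ins_k3 (x : Int) :
    ∀ (s : List Int), s.Pairwise (· ≤ ·) →
      pvK3 (pvIns x (pvK3 s)) = pvK3 (pvIns x s) := by
  intro s
  induction s with
  | nil => intro _; rfl
  | cons a s ih =>
      intro hp
      by_cases h3 : s.length < 3
      · rw [pvK3_of_len_le (a :: s) (by simp; omega)]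
      · have hlen : 3 ≤ s.length := by omega
        have hk3cons : pvK3 (a :: s) = pvK3 s := pvK3_cons a s hlen
        by_cases hx : x < a
        · -- x goes to the very front; it is dropped from both sides
          have hins : pvIns x (a :: s) = x :: a :: s := by
            simp [pvIns, PySem.List.insertBy, hx]
          have hRHS : pvK3 (pvIns x (a :: s)) = pvK3 s := by
            rw [hins, pvK3_cons x (a :: s) (by simp; omega), pvK3_cons a s hlen]
          -- x is below every element of pvK3 s, so it goes to the front there too
          have hksl : (pvK3 s).length = 3 := by unfold pvK3; simp; omega
          have hle : ∀ b ∈ pvK3 s, x < b := by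
            intro b hb
            have hbs : b ∈ s := List.mem_of_mem_drop hb
            have := (List.pairwise_cons.mp hp).1 b hbs
            omega
          have hfront : pvIns x (pvK3 s) = x :: pvK3 s := by
            cases hk : pvK3 s with
            | nil => simp [hk] at hksl
            | cons y rest =>
                have hy : x < y := hle y (by simp [hk])
                simp [pvIns, PySem.List.insertBy, hy]
          rw [hk3cons, hfront, pvK3_cons x (pvK3 s) (by omega), hRHS,
            pvK3_of_len_le (pvK3 s) (by omega)]
        · -- x goes past a on the right; a is dropped from both sides
          have hins : pvIns x (a :: s) = a :: pvIns x s := by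
            simp [pvIns, PySem.List.insertBy, hx]
          rw [hk3cons, hins, pvK3_cons a (pvIns x s) (by rw [pvIns_length]; omega)]
          exact ih (List.pairwise_cons.mp hp).2

-- B's fold computes the last 3 of the full ascending sort
lemma pvFold_eq (xs : List Int) :
    ∀ p : List Int,
      xs.foldl pvStep (pvK3 (PySem.List.sorted p (fun x => x)))
        = pvK3 (PySem.List.sorted (p ++ xs) (fun x => x)) := by
  induction xs with
  | nil => intro p; simp
  | cons t xs ih =>
      intro p
      have hsorted : PySem.List.sorted (pvK3 (PySem.List.sorted p (fun x => x)) ++ [t]) (fun x => x)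
          = pvIns t (pvK3 (PySem.List.sorted p (fun x => x))) := by
        rw [sorted_single_append]
        congr 1
        exact PySem.List.sorted_eq_self_of_pairwise _ _
          ((PySem.List.sorted_pairwise p (fun x => x)).drop)
      have hstep : pvStep (pvK3 (PySem.List.sorted p (fun x => x))) t
          = pvK3 (PySem.List.sorted (p ++ [t]) (fun x => x)) := by
        rw [pvStep_eq, hsorted,
          pvK3_ins_k3 t (PySem.List.sorted p (fun x => x)) (PySem.List.sorted_pairwise p _),
          ← sorted_single_append]
      rw [List.foldl_cons, hstep, ih (p ++ [t])]
      simp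

-- the descending sort is the reverse of the ascending sort (lists of Int values)
lemma sorted_rev_eq_reverse (ts : List Int) :
    PySem.List.sorted ts (fun x => x) true = (PySem.List.sorted ts (fun x => x)).reverse := by
  have hperm : (PySem.List.sorted ts (fun x => x) true).Perm
      (PySem.List.sorted ts (fun x => x)).reverse :=
    (PySem.List.sorted_perm ts _ true).trans
      ((PySem.List.sorted_perm ts _ false).symm.trans (List.reverse_perm _).symm)
  refine List.Perm.eq_of_pairwise (le := fun a b : Int => b ≤ a) ?_ ?_ ?_ hperm
  · intro a b _ _ h1 h2; omega
  · exact PySem.List.sorted_pairwise_rev ts _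
  · rw [List.pairwise_reverse]
    exact PySem.List.sorted_pairwise ts _

-- A's top slice has the same sum as B's maintained suffix
lemma sum_top3 (ts : List Int) :
    (PySem.List.slice (PySem.List.sorted ts (fun x => x) true) (some 0) (some 3)).sum
      = (pvK3 (PySem.List.sorted ts (fun x => x))).sum := by
  rw [PySem.List.slice_zero_start, PySem.List.slice_to _ (by norm_num : (0:Int) ≤ 3)]
  rw [sorted_rev_eq_reverse]
  have : (3 : Int).toNat = 3 := rfl
  rw [this, List.take_reverse, List.sum_reverse]
  rfl

lemma pvFoldSome (lines : List String)
    (h : ∀ v ∈ lines, (PySem.Int.ofStr? v).isSome = true) :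
    ∀ s : Int,
      ((lines.foldl (fun acc v => acc.bind fun t => (PySem.Int.ofStr? v).map (fun n => t + n))
        (some s)).isSome) = true := by
  induction lines with
  | nil => intro s; rfl
  | cons v lines ih =>
      intro s
      obtain ⟨n, hn⟩ := Option.isSome_iff_exists.mp (h v (by simp))
      simp only [List.foldl_cons, hn, Option.bind_some, Option.map_some]
      exact ih (fun w hw => h w (by simp [hw])) (s + n)

lemma pvMapMSome (elves : List String)
    (h : ∀ e ∈ elves, (pvElfTotalA? e).isSome = true) :
    ∃ ts : List Int, elves.mapM pvElfTotalA? = some ts := by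
  induction elves with
  | nil => exact ⟨[], rfl⟩
  | cons e elves ih =>
      obtain ⟨n, hn⟩ := Option.isSome_iff_exists.mp (h e (by simp))
      obtain ⟨ts, hts⟩ := ih (fun w hw => h w (by simp [hw]))
      exact ⟨n :: ts, by simp [List.mapM_cons, hn, hts]⟩

lemma pvBridge (elves : List String) :
    ∀ (ts top : List Int), elves.mapM pvElfTotalA? = some ts →
      elves.foldl (fun st elf => st.bind fun tp => (pvElfTotalB? elf).map (pvStep tp)) (some top)
        = some (ts.foldl pvStep top) := by
  induction elves with
  | nil => intro ts top h; simp_all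
  | cons e elves ih =>
      intro ts top h
      simp only [List.mapM_cons, Option.bind_eq_bind, Option.bind_eq_some_iff] at h
      obtain ⟨n, hn, rest, hrest, hts⟩ := h
      have hB : pvElfTotalB? e = some n := hn
      simp only [List.foldl_cons, hB, Option.bind_some, Option.map_some]
      obtain rfl : n :: rest = ts := by simpa using hts
      rw [ih rest (pvStep top n) hrest]
      rfl

-- ===== VERDICT (by name: the statement is the Claim_ definition above) =====
theorem part2_spec : Claim_equal_part2 := by
  intro input _ hpre
  unfold Spec_part2
  unfold Pre_part2 at hpre
  simp only [List.all_eq_true] at hpre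
  have hsome : ∀ e ∈ pvSplit input "\n\n", (pvElfTotalA? e).isSome = true := by
    intro e he
    exact pvFoldSome _ (fun v hv => by
      have := hpre e he v hv
      simpa using this) 0
  obtain ⟨ts, hts⟩ := pvMapMSome _ hsome
  rw [part2, part2_alt, hts, pvBridge _ ts [] hts]
  show (PySem.List.slice (PySem.List.sorted ts (fun x => x) true) (some 0) (some 3)).sum
    = (List.foldl pvStep [] ts).sum
  rw [sum_top3]
  have := pvFold_eq ts []
  simp only [List.nil_append] at this
  rw [← this]
  rfl
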